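-- pv_equiv track=rewrite | github.com/zxjAiLun/keqing1 | src/keqingrl/rule_score.py | _fallback_chosen_index
-- ===== SOURCE A (Python) =====
-- from typing import Any, Mapping, Sequence
--
-- def _fallback_chosen_index(mjai_actions: Sequence[Mapping[str, object]]) -> int:
--     if not mjai_actions:
--         return 0
--     for preferred_type in ("hora", "reach", "dahai", "none"):
--         for index, action in enumerate(mjai_actions):
--             if str(action.get("type", "unknown")) == preferred_type:
--                 return index
--     return 0
-- ===== SOURCE B (Python) =====
-- from typing import Any, Mapping, Sequence
--
-- def _fallback_chosen_index(mjai_actions: Sequence[Mapping[str, object]]) -> int: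
--     first_idx = {}
--     for index, action in enumerate(mjai_actions):
--         first_idx.setdefault(str(action.get("type", "unknown")), index)
--     for preferred_type in ("hora", "reach", "dahai", "none"):
--         if preferred_type in first_idx:
--             return first_idx[preferred_type]
--     return 0
-- ===== Notes on version B (the rewrite author's own statement) =====
-- stated objective: alternative
-- what changed: Replaces the nested repeated scan (one full pass per priority type) with a single pass building a first-occurrence index table via setdefault, followed by a constant-size priority lookup.
import Mathlib
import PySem

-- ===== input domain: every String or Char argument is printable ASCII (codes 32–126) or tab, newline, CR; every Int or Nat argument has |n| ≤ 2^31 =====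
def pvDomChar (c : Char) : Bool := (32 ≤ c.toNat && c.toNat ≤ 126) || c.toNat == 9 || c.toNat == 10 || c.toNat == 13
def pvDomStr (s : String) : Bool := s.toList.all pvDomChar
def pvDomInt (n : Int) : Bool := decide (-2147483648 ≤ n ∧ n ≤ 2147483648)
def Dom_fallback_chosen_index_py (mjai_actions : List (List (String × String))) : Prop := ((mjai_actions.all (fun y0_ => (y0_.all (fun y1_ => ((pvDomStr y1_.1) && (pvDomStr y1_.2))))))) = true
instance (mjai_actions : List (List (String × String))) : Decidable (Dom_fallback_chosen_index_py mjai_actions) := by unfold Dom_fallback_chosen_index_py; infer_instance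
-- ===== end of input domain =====

-- B replaces A's one-full-scan-per-priority-type nested loop by a single pass building a
-- first-occurrence index table (dict.setdefault) followed by a constant-size priority lookup.

-- action.get("type", "unknown"): first match in the association list, default "unknown"
-- (dicts have unique keys, so first match is exact; str(...) of a str is the identity)
def pvTypeKey (action : List (String × String)) : String :=
  (action.lookup "type").getD "unknown"

-- ===== PORT A =====
-- inner loop: 'for index, action in enumerate(mjai_actions): if … == preferred_type: return index'
def pvScanA (t : String) : List (Int × List (String × String)) → Option Int
  | [] => none
  | (i, a) :: rest => if pvTypeKey a = t then some i else pvScanA t rest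

-- outer loop over the priority tuple
def pvLoopA (l : List (List (String × String))) : List String → Option Int
  | [] => none
  | t :: ts =>
    match pvScanA t (PySem.List.enumerate l 0) with
    | some i => some i
    | none => pvLoopA l ts

def fallback_chosen_index_py (mjai_actions : List (List (String × String))) : Int :=
  if mjai_actions = [] then 0
  else
    match pvLoopA mjai_actions ["hora", "reach", "dahai", "none"] with
    | some i => i
    | none => 0

-- ===== PORT B =====
-- 'for index, action in enumerate(...): first_idx.setdefault(str(action.get("type","unknown")), index)'
def pvBuildB (ps : List (Int × List (String × String))) : PySem.Dict String Int :=
  ps.foldl (fun d p => d.setdefault (pvTypeKey p.2) p.1) PySem.Dict.empty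

-- 'for preferred_type in (...): if preferred_type in first_idx: return first_idx[preferred_type]'
def pvLookupB (d : PySem.Dict String Int) : List String → Int
  | [] => 0
  | t :: ts =>
    match d.get? t with
    | some i => i
    | none => pvLookupB d ts

def fallback_chosen_index_py_alt (mjai_actions : List (List (String × String))) : Int :=
  pvLookupB (pvBuildB (PySem.List.enumerate mjai_actions 0)) ["hora", "reach", "dahai", "none"]

-- ===== PRECONDITION & SPEC =====
def Spec_fallback_chosen_index_py (mjai_actions : List (List (String × String))) (out : Int) : Prop := out = fallback_chosen_index_py_alt mjai_actions
instance (mjai_actions : List (List (String × String))) (out : Int) : Decidable (Spec_fallback_chosen_index_py mjai_actions out) := by unfold Spec_fallback_chosen_index_py; infer_instance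

-- ===== CLAIM (what is proved, stated in full; the proofs are below) =====
def Claim_equal_fallback_chosen_index_py : Prop := ∀ (mjai_actions : List (List (String × String))), Dom_fallback_chosen_index_py mjai_actions → Spec_fallback_chosen_index_py mjai_actions (fallback_chosen_index_py mjai_actions)

-- ===== LEMMAS AND PROOFS =====

-- one setdefault step, seen through get?
lemma pv_setdefault_get? (d : PySem.Dict String Int) (k : String) (v : Int) (t : String) :
    (d.setdefault k v).get? t = (d.get? t).or (if k = t then some v else none) := by
  by_cases hk : k = t
  · subst hk
    simp only [PySem.Dict.setdefault]
    by_cases hc : d.contains k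
    · rw [PySem.Dict.contains_eq_isSome_get?] at hc
      obtain ⟨w, hw⟩ := Option.isSome_iff_exists.mp hc
      simp [if_pos (PySem.Dict.contains_eq_isSome_get? d k ▸ hc), hw]
    · have hn : d.get? k = none := by
        rcases h : d.get? k with _ | w
        · rfl
        · exact absurd (by rw [PySem.Dict.contains_eq_isSome_get?, h]; rfl) hc
      have he : (PySem.Dict.mk (d.items ++ [(k, v)]) : PySem.Dict String Int) = d.insert k v := by
        apply PySem.Dict.ext
        rw [PySem.Dict.items_insert_of_not_contains d v (Bool.not_eq_true _ ▸ hc)]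
      simp [hc, hn, he, PySem.Dict.get?_insert_self]
  · simp only [PySem.Dict.setdefault, if_neg hk]
    by_cases hc : d.contains k
    · simp [hc]
    · have he : (PySem.Dict.mk (d.items ++ [(k, v)]) : PySem.Dict String Int) = d.insert k v := by
        apply PySem.Dict.ext
        rw [PySem.Dict.items_insert_of_not_contains d v (Bool.not_eq_true _ ▸ hc)]
      simp [hc, he, PySem.Dict.get?_insert_of_ne d v (Ne.symm hk)]

-- the setdefault loop's table answers exactly what A's inner scan answers
lemma pv_build_get? (ps : List (Int × List (String × String))) (d : PySem.Dict String Int)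
    (t : String) :
    (ps.foldl (fun d p => d.setdefault (pvTypeKey p.2) p.1) d).get? t
      = (d.get? t).or (pvScanA t ps) := by
  induction ps generalizing d with
  | nil => simp [pvScanA]
  | cons p rest ih =>
    obtain ⟨i, a⟩ := p
    rw [List.foldl_cons, ih, pv_setdefault_get?, Option.or_assoc]
    congr 1
    by_cases hk : pvTypeKey a = t <;> simp [pvScanA, hk]

-- B's priority lookup equals A's priority loop (then getD 0), for any action list
lemma pv_lookup_eq (l : List (List (String × String))) (ts : List String) :
    pvLookupB (pvBuildB (PySem.List.enumerate l 0)) ts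
      = (pvLoopA l ts).getD 0 := by
  induction ts with
  | nil => simp [pvLookupB, pvLoopA]
  | cons t ts ih =>
    have h : (pvBuildB (PySem.List.enumerate l 0)).get? t
        = pvScanA t (PySem.List.enumerate l 0) := by
      rw [pvBuildB, pv_build_get?, PySem.Dict.get?_empty, Option.none_or]
    simp only [pvLookupB, pvLoopA, h]
    cases pvScanA t (PySem.List.enumerate l 0) <;> simp [ih]

-- ===== VERDICT (by name: the statement is the Claim_ definition above) =====
theorem fallback_chosen_index_py_spec : Claim_equal_fallback_chosen_index_py := by
  intro l _
  unfold Spec_fallback_chosen_index_py fallback_chosen_index_py fallback_chosen_index_py_alt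
  rw [pv_lookup_eq]
  by_cases h : l = []
  · subst h; rfl
  · rw [if_neg h]
    cases pvLoopA l ["hora", "reach", "dahai", "none"] <;> rfl
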